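-- pv_equiv track=rewrite | github.com/rladusdn02/Algorithm-codeit | 프로그래머스/0/181926. 수 조작하기 1/수 조작하기 1.py | solution
-- ===== SOURCE A (Python) =====
-- def solution(n, control):
--     con_list=list(control)
--     for i in range(len(con_list)):
--         if con_list[i]=='w':
--             n+=1
--         elif con_list[i]=='s':
--             n-=1
--         elif con_list[i]=='d':
--             n+=10
--         elif con_list[i]=='a':
--             n-=10
--     return n
-- ===== SOURCE B (Python) =====
-- DELTA = {'w': 1, 's': -1, 'd': 10, 'a': -10}
--
-- def _delta(s):
--     # total shift contributed by s, by divide and conquer on halves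
--     if len(s) == 0:
--         return 0
--     if len(s) == 1:
--         return DELTA.get(s[0], 0)
--     m = len(s) // 2
--     return _delta(s[:m]) + _delta(s[m:])
--
-- def solution(n, control):
--     return n + _delta(control)
-- ===== Notes on version B (the rewrite author's own statement) =====
-- stated objective: alternative
-- what changed: Replaces A's single left-to-right loop mutating n per character with a divide-and-conquer recursion that splits the string in halves, computes each half's total shift independently via a delta table, and adds the parts to n.
import Mathlib
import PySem

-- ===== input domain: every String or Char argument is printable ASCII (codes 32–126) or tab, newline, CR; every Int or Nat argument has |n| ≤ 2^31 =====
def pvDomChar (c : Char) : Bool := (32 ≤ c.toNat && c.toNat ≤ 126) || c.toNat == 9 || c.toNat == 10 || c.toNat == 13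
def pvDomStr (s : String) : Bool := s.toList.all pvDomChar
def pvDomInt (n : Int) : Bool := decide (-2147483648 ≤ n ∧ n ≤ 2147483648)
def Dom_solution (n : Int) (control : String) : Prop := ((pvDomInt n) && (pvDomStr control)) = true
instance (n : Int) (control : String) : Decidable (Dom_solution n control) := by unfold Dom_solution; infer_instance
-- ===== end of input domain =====

-- B replaces A's single accumulating loop by a divide-and-conquer recursion on string halves (alternative decomposition; no speed claim).
-- ===== PORT A =====
def solution (n : Int) (control : String) : Int :=
  let con_list := control.toList
  (PySem.List.pyRange 0 (con_list.length : Int) 1).foldl (fun n i =>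
    let c := PySem.List.pyGetD con_list i ' '
    if c = 'w' then n + 1
    else if c = 's' then n - 1
    else if c = 'd' then n + 10
    else if c = 'a' then n - 10
    else n) n

-- ===== PORT B =====
-- DELTA = {'w': 1, 's': -1, 'd': 10, 'a': -10}
def pvDELTA : PySem.Dict Char Int :=
  PySem.Dict.ofList [('w', 1), ('s', -1), ('d', 10), ('a', -10)]

-- _delta(s): divide and conquer on halves.  s[:m] / s[m:] are ported as take/drop,
-- exact here since 0 ≤ m ≤ len(s); s[0] on a length-1 string is pyGetD at 0 (in range, exact).
def pvdelta (l : List Char) : Int :=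
  if l.length = 0 then 0
  else if l.length = 1 then pvDELTA.getD (PySem.List.pyGetD l 0 ' ') 0
  else
    let m := l.length / 2
    pvdelta (l.take m) + pvdelta (l.drop m)
termination_by l.length
decreasing_by all_goals simp [List.length_take, List.length_drop]; omega

def solution_alt (n : Int) (control : String) : Int :=
  n + pvdelta control.toList

-- ===== PRECONDITION & SPEC =====
def Spec_solution (n : Int) (control : String) (out : Int) : Prop := out = solution_alt n control
instance (n : Int) (control : String) (out : Int) : Decidable (Spec_solution n control out) := by unfold Spec_solution; infer_instance

-- ===== CLAIM (what is proved, stated in full; the proofs are below) =====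
def Claim_equal_solution : Prop := ∀ (n : Int) (control : String), Dom_solution n control → Spec_solution n control (solution n control)

-- ===== LEMMAS AND PROOFS =====
-- the common count-based value both sides reduce to
def pvF (l : List Char) : Int :=
  (l.count 'w' : Int) - (l.count 's' : Int)
    + 10 * (l.count 'd' : Int) - 10 * (l.count 'a' : Int)

theorem pvF_append (a b : List Char) : pvF (a ++ b) = pvF a + pvF b := by
  simp [pvF, List.count_append]; push_cast; ring

theorem loop_eq_counts (l : List Char) (n : Int) :
    l.foldl (fun n c =>
      if c = 'w' then n + 1
      else if c = 's' then n - 1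
      else if c = 'd' then n + 10
      else if c = 'a' then n - 10
      else n) n = n + pvF l := by
  induction l generalizing n with
  | nil => simp [pvF]
  | cons c t ih =>
    simp only [List.foldl_cons, ih, pvF, List.count_cons]
    by_cases hw : c = 'w' <;> by_cases hs : c = 's' <;> by_cases hd : c = 'd' <;>
      by_cases ha : c = 'a' <;> simp_all <;> push_cast <;> ring

theorem getD_DELTA (c : Char) :
    pvDELTA.getD c 0 =
      if c = 'w' then 1 else if c = 's' then (-1) else if c = 'd' then 10
      else if c = 'a' then (-10) else 0 := by
  rcases eq_or_ne c 'w' with rfl | hw; · decide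
  rcases eq_or_ne c 's' with rfl | hs; · decide
  rcases eq_or_ne c 'd' with rfl | hd; · decide
  rcases eq_or_ne c 'a' with rfl | ha; · decide
  simp [pvDELTA, PySem.Dict.getD, PySem.Dict.ofList, PySem.Dict.empty, PySem.Dict.update,
    PySem.Dict.insert, PySem.Dict.contains, PySem.Dict.get?, hw, hs, hd, ha,
    hw.symm, hs.symm, hd.symm, ha.symm]

theorem pvF_single (c : Char) :
    pvF [c] =
      if c = 'w' then 1 else if c = 's' then (-1) else if c = 'd' then 10
      else if c = 'a' then (-10) else 0 := by
  rcases eq_or_ne c 'w' with rfl | hw; · decide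
  rcases eq_or_ne c 's' with rfl | hs; · decide
  rcases eq_or_ne c 'd' with rfl | hd; · decide
  rcases eq_or_ne c 'a' with rfl | ha; · decide
  simp [pvF, hw, hs, hd, ha, hw.symm, hs.symm, hd.symm, ha.symm]

theorem pvdelta_eq (l : List Char) : pvdelta l = pvF l := by
  fun_induction pvdelta with
  | case1 l h0 => simp [List.length_eq_zero_iff.mp h0, pvF]
  | case2 l h0 h1 =>
    obtain ⟨c, hc⟩ := List.length_eq_one_iff.mp h1
    subst hc
    simp only [PySem.List.pyGetD, PySem.List.pyGet?, PySem.List.pyIdx?]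
    rw [pvF_single, ← getD_DELTA]
    simp [PySem.List.pyGetD, PySem.List.pyGet?, PySem.List.pyIdx?]
  | case3 l h0 h1 m ih1 ih2 =>
    rw [ih1, ih2, ← pvF_append, List.take_append_drop]

-- ===== VERDICT (by name: the statement is the Claim_ definition above) =====
theorem solution_spec : Claim_equal_solution := by
  intro n control _
  unfold Spec_solution solution solution_alt
  rw [pvdelta_eq]
  exact (PySem.List.foldl_pyRange_zero_pyGetD' control.toList ' '
    (fun n c => if c = 'w' then n + 1 else if c = 's' then n - 1
      else if c = 'd' then n + 10 else if c = 'a' then n - 10 else n) n).trans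
    (loop_eq_counts _ _)
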